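-- pv_equiv track=rewrite | github.com/Joshin95/programming | infoitic/Projecte_Info/transf1.py | htrim
-- ===== SOURCE A (Python) =====
-- def htrim(img):
--     if img[1]!=[]:
--         count1=1
--         l=[]
--         eliminada=[]
--         mat=[]
--         mat1=[]
--         m=img[1]
--         x=len(m)
--         y=len(m[0])
--         for fila in range(y):
--             f=[]
--             for columna in range(x):
--                 f+=[0]
--             mat+=[f]
--         for i in range(y):
--             for j in range(x):
--                 mat[i][j]=m[j][i]
--         for c in mat:
--             count1=0
--             l=[]
--             for u in c:
--                 e=len(c)
--                 if u==255:
--                     count1+=1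
--                 l+=[u]
--             if count1==e:
--                 eliminada+=[l]
--             elif count1!=e:
--                 break
--         k=len(eliminada)
--         q=mat[k:]
--         o=len(q)
--         s=o-1
--         eliminada2=[]
--         while s<=o and s>=0:
--             count1=0
--             l=[]
--             for u in q[s]:
--                 e=len(q[s])
--                 if u==255:
--                     count1+=1
--                 l+=[u]
--             if count1==e:
--                 eliminada2+=[l]
--             elif count1!=e:
--                 break
--             s-=1
--         p=len(eliminada2)
--         z=q[:o-p]
--         x1=len(z)
--         y1=len(z[0])
--         for fila in range(y1):
--             f=[]
--             for columna in range(x1):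
--                 f+=[0]
--             mat1+=[f]
--         for i in range(y1):
--             for j in range(x1):
--                 mat1[i][j]=z[j][i]
--         return ("1",mat1)
-- ===== SOURCE B (Python) =====
-- def htrim(img):
--     m = img[1]
--     if m == []:
--         return None
--     y = len(m[0])
--
--     def white(c):
--         return all(row[c] == 255 for row in m)
--
--     lo = 0
--     while lo < y and white(lo):
--         lo += 1
--     hi = y
--     while hi > lo and white(hi - 1):
--         hi -= 1
--     return ("1", [row[lo:hi] for row in m])
-- ===== Notes on version B (the rewrite author's own statement) =====
-- stated objective: simpler
-- what changed: B drops A's two zero-matrix-plus-assignment transposes and flag-driven column scans entirely: it finds the first and last non-all-white column indices lo/hi by direct short-circuiting scans and returns each row sliced to [lo:hi], never materialising a transposed matrix.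
import Mathlib
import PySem

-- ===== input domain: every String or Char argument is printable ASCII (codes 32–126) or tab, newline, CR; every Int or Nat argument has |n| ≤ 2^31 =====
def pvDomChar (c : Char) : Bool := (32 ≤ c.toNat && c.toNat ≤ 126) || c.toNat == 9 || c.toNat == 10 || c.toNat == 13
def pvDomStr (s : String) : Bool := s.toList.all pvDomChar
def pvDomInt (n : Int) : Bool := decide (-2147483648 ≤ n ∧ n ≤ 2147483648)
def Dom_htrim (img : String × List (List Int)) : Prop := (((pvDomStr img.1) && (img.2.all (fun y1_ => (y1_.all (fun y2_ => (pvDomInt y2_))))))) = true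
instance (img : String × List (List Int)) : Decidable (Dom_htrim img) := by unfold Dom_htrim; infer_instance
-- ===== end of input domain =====

-- B replaces A's two zero-matrix-plus-assignment transposes and flag/while column scans by direct
-- lo/hi scans over column indices and per-row slicing (objective: simpler).

-- ===== PORT A =====
-- inner counting loop of A's column scans: count1 accumulation over a column
def pvCount255 (c : List Int) : Int :=
  c.foldl (fun count1 u => if u == 255 then count1 + 1 else count1) 0

-- 'f=[]; for columna in range(x): f+=[0]'
def pvZeroRow (x : Nat) : List Int :=
  (List.range x).foldl (fun f _ => f ++ [(0 : Int)]) []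

-- 'for i in range(y): for j in range(x): mat[i][j]=m[j][i]'
-- (indexing via getD: exact on Pre_, where every index is in range)
def pvFill (m : List (List Int)) (x y : Nat) (mat : List (List Int)) : List (List Int) :=
  (List.range y).foldl (fun acc i =>
    (List.range x).foldl (fun acc2 j =>
      acc2.modify i (fun row => row.set j ((m.getD j []).getD i 0))) acc) mat

def pvTranspose (m : List (List Int)) (x y : Nat) : List (List Int) :=
  pvFill m x y ((List.range y).foldl (fun acc _ => acc ++ [pvZeroRow x]) [])

-- 'for c in mat: … if count1==e: eliminada+=[l] elif count1!=e: break'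
def pvLeadScan (mat : List (List Int)) : List (List Int) :=
  (mat.foldl (fun (st : Bool × List (List Int)) c =>
    if st.1 then st
    else
      let count1 := pvCount255 c
      let e : Int := c.length
      if count1 = e then (false, st.2 ++ [c]) else (true, st.2)) (false, [])).2

-- 'while s<=o and s>=0: … s-=1' (fuel bounds the iteration count; s is Python's int s)
def pvTrailScan (q : List (List Int)) : Nat → Int → List (List Int) → List (List Int)
  | 0, _, acc => acc
  | fuel + 1, s, acc =>
    if s ≤ (q.length : Int) ∧ 0 ≤ s then
      let row := q.getD s.toNat []
      if pvCount255 row = (row.length : Int) then pvTrailScan q fuel (s - 1) (acc ++ [row])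
      else acc
    else acc

def htrim (img : String × List (List Int)) : Option (String × List (List Int)) :=
  if img.2 ≠ [] then
    let m := img.2
    let x := m.length
    let y := (m.headD []).length
    let mat := pvTranspose m x y
    let eliminada := pvLeadScan mat
    let k := eliminada.length
    let q := mat.drop k
    let o := q.length
    let eliminada2 := pvTrailScan q (o + 1) ((o : Int) - 1) []
    let p := eliminada2.length
    let z := q.take (o - p)
    let x1 := z.length
    let y1 := (z.headD []).length
    some ("1", pvTranspose z x1 y1)
  else none

-- ===== PORT B =====
-- 'all(row[c] == 255 for row in m)' (getD: exact on Pre_, where c is in range for every row)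
def pvColWhite (m : List (List Int)) (c : Nat) : Bool :=
  m.all (fun row => row.getD c 0 == 255)

-- 'while lo < y and white(lo): lo += 1'
def pvLo (m : List (List Int)) (y lo : Nat) : Nat :=
  if h : lo < y ∧ pvColWhite m lo = true then pvLo m y (lo + 1) else lo
termination_by y - lo
decreasing_by omega

-- 'while hi > lo and white(hi-1): hi -= 1'
def pvHi (m : List (List Int)) (lo hi : Nat) : Nat :=
  if h : lo < hi ∧ pvColWhite m (hi - 1) = true then pvHi m lo (hi - 1) else hi
termination_by hi
decreasing_by omega

def htrim_alt (img : String × List (List Int)) : Option (String × List (List Int)) :=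
  let m := img.2
  if m = [] then none
  else
    let y := (m.headD []).length
    let lo := pvLo m y 0
    let hi := pvHi m lo y
    some ("1", m.map (fun row => PySem.List.slice row (some (lo : Int)) (some (hi : Int))))

-- ===== PRECONDITION & SPEC =====
-- Pre_ excludes exactly the inputs where Python A raises (and returns on no others):
-- a row shorter than the first row (IndexError in the transpose), and a non-empty matrix
-- all of whose first-row-width columns are entirely 255 — including zero width — on which
-- 'len(z[0])' raises IndexError because every column is trimmed away.
def Pre_htrim (img : String × List (List Int)) : Prop :=
  img.2 = [] ∨
  ((∀ row ∈ img.2, (img.2.headD []).length ≤ row.length) ∧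
   ∃ c < (img.2.headD []).length, ∃ row ∈ img.2, row.getD c 0 ≠ 255)

instance (img : String × List (List Int)) : Decidable (Pre_htrim img) := by
  unfold Pre_htrim; infer_instance

def pvWitness_htrim : (String × List (List Int)) := ("a", [[0, 255], [255, 255]])

def Spec_htrim (img : String × List (List Int)) (out : Option (String × List (List Int))) : Prop := out = htrim_alt img
instance (img : String × List (List Int)) (out : Option (String × List (List Int))) : Decidable (Spec_htrim img out) := by unfold Spec_htrim; infer_instance

-- ===== CLAIM (what is proved, stated in full; the proofs are below) =====
def Claim_equal_htrim : Prop := ∀ (img : String × List (List Int)), Dom_htrim img → Pre_htrim img → Spec_htrim img (htrim img)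

-- ===== LEMMAS AND PROOFS =====

-- the transposed matrix: column i of m, as A's transpose produces it
def pvColF (m : List (List Int)) (i : Nat) : List Int :=
  (List.range m.length).map (fun j => (m.getD j []).getD i 0)

-- A's "column is all white" test as a Bool
def pvWhiteB (c : List Int) : Bool := decide (pvCount255 c = (c.length : Int))

-- number of consecutive all-white rows of q walking DOWN from index s
def pvCdw (q : List (List Int)) : Nat → Nat
  | 0 => if pvWhiteB (q.getD 0 []) then 1 else 0
  | s + 1 => if pvWhiteB (q.getD (s + 1) []) then pvCdw q s + 1 else 0

theorem pv_modify_append {α : Type} (A : List α) (b : α) (B : List α) (f : α → α)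
    (n : Nat) (h : A.length = n) : (A ++ b :: B).modify n f = A ++ f b :: B := by
  subst h
  induction A with
  | nil => simp [List.modify]
  | cons a t ih => simpa [List.modify] using ih


theorem pv_set_append {α : Type} (A : List α) (b : α) (B : List α) (v : α)
    (n : Nat) (h : A.length = n) : (A ++ b :: B).set n v = A ++ v :: B := by
  subst h
  induction A with
  | nil => simp
  | cons a t ih => simpa using ih


theorem pv_modify_modify {α : Type} (l : List α) (i : Nat) (f g : α → α) :
    (l.modify i f).modify i g = l.modify i (fun x => g (f x)) := by
  induction l generalizing i with
  | nil => simp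
  | cons a t ih =>
    cases i with
    | zero => simp
    | succ n => simp [ih]


theorem pv_modify_id {α : Type} (l : List α) (i : Nat) : l.modify i (fun x => x) = l := by
  induction l generalizing i with
  | nil => simp
  | cons a t ih =>
    cases i with
    | zero => simp
    | succ n => simp [ih]


theorem pv_foldl_modify {α : Type} (l : List Nat) (i : Nat) (F : Nat → α → α) (acc : List α) :
    l.foldl (fun a j => a.modify i (F j)) acc
      = acc.modify i (fun r => l.foldl (fun r j => F j r) r) := by
  induction l generalizing acc with
  | nil => simp [pv_modify_id]
  | cons j t ih =>
    simp only [List.foldl_cons]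
    rw [ih, pv_modify_modify]


theorem pv_foldl_set (v : Nat → Int) :
    ∀ (n : Nat) (row : List Int), n ≤ row.length →
    (List.range n).foldl (fun r j => r.set j (v j)) row = (List.range n).map v ++ row.drop n := by
  intro n
  induction n with
  | zero => simp
  | succ n ih =>
    intro row h
    rw [List.range_succ, List.foldl_append, ih row (by omega), List.map_append]
    simp only [List.foldl_cons, List.foldl_nil]
    have hd : row.drop n = row[n] :: row.drop (n + 1) := (List.getElem_cons_drop (by omega)).symm
    rw [hd, pv_set_append _ _ _ _ _ (by simp), List.append_assoc]
    rfl


theorem pv_foldl_modifyF (F : Nat → List Int → List Int) :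
    ∀ (n : Nat) (acc : List (List Int)), n ≤ acc.length →
    (List.range n).foldl (fun a i => a.modify i (F i)) acc
      = ((List.range n).map (fun i => F i (acc.getD i []))) ++ acc.drop n := by
  intro n
  induction n with
  | zero => simp
  | succ n ih =>
    intro acc h
    rw [List.range_succ, List.foldl_append, ih acc (by omega), List.map_append]
    simp only [List.foldl_cons, List.foldl_nil]
    have hd : acc.drop n = acc[n] :: acc.drop (n + 1) := (List.getElem_cons_drop (by omega)).symm
    rw [hd, pv_modify_append _ _ _ _ _ (by simp), List.append_assoc]
    simp only [List.map_cons, List.map_nil, List.singleton_append]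
    rw [List.getD_eq_getElem acc [] (by omega)]
    rfl



theorem pv_transpose_eq (m : List (List Int)) (x y : Nat) :
    pvTranspose m x y
      = (List.range y).map (fun i => (List.range x).map (fun j => (m.getD j []).getD i 0)) := by
  unfold pvTranspose pvFill
  have hz0 : (List.range x).foldl (fun f _ => f ++ [(0 : Int)]) []
      = [] ++ (List.range x).map (fun _ : Nat => (0 : Int)) :=
    PySem.List.foldl_append_singleton_eq_map ..
  have hzz : pvZeroRow x = List.replicate x (0 : Int) := by
    unfold pvZeroRow
    simpa [List.map_const'] using hz0
  have h0' : (List.range y).foldl (fun acc _ => acc ++ [pvZeroRow x]) []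
      = [] ++ (List.range y).map (fun _ : Nat => pvZeroRow x) :=
    PySem.List.foldl_append_singleton_eq_map ..
  have h0 : (List.range y).foldl (fun acc _ => acc ++ [pvZeroRow x]) []
      = List.replicate y (List.replicate x (0 : Int)) := by
    simpa [List.map_const', hzz] using h0'
  rw [h0]
  have hfun : (fun (acc : List (List Int)) (i : Nat) =>
        (List.range x).foldl (fun acc2 j => acc2.modify i (fun row => row.set j ((m.getD j []).getD i 0))) acc)
      = (fun acc i => acc.modify i (fun r => (List.range x).foldl (fun r j => r.set j ((m.getD j []).getD i 0)) r)) := by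
    funext acc i
    exact pv_foldl_modify (List.range x) i _ acc
  rw [hfun]
  rw [pv_foldl_modifyF _ y _ (by simp)]
  simp only [List.drop_replicate, Nat.sub_self, List.replicate_zero, List.append_nil]
  apply List.map_congr_left
  intro i hi
  rw [List.mem_range] at hi
  have hg : (List.replicate y (List.replicate x (0 : Int))).getD i [] = List.replicate x (0 : Int) := by
    rw [List.getD_eq_getElem _ _ (by simpa using hi)]
    simp
  rw [hg, pv_foldl_set _ x _ (by simp)]
  simp


theorem pv_transpose_cols (m : List (List Int)) (y : Nat) :
    pvTranspose m m.length y = (List.range y).map (pvColF m) := by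
  rw [pv_transpose_eq]
  rfl

theorem pv_count255_eq_len_iff (c : List Int) :
    pvCount255 c = (c.length : Int) ↔ ∀ u ∈ c, u = 255 := by
  unfold pvCount255
  rw [PySem.List.foldl_count_if (fun u => u == 255) c 0]
  constructor
  · intro h u hu
    have hc : c.countP (fun u => u == 255) = c.length := by omega
    simpa using List.countP_eq_length.mp hc u hu
  · intro h
    have hc : c.countP (fun u => u == 255) = c.length :=
      List.countP_eq_length.mpr (by intro u hu; simpa using h u hu)
    omega


theorem pv_whiteB_colF (m : List (List Int)) (c : Nat) :
    pvWhiteB (pvColF m c) = pvColWhite m c := by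
  have key : (pvCount255 (pvColF m c) = ((pvColF m c).length : Int)) ↔ (∀ row ∈ m, row.getD c 0 = 255) := by
    rw [pv_count255_eq_len_iff]
    constructor
    · intro h row hrow
      obtain ⟨j, hj, rfl⟩ := List.mem_iff_getElem.mp hrow
      have hmem : (m.getD j []).getD c 0 ∈ pvColF m c := by
        unfold pvColF
        exact List.mem_map.mpr ⟨j, List.mem_range.mpr hj, rfl⟩
      have := h _ hmem
      rwa [List.getD_eq_getElem m [] hj] at this
    · intro h u hu
      unfold pvColF at hu
      obtain ⟨j, hj, rfl⟩ := List.mem_map.mp hu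
      rw [List.mem_range] at hj
      have hmem : m.getD j [] ∈ m := by
        rw [List.getD_eq_getElem m [] hj]
        exact List.getElem_mem hj
      exact h _ hmem
  unfold pvWhiteB pvColWhite
  rw [Bool.eq_iff_iff]
  simp only [decide_eq_true_eq, List.all_eq_true, beq_iff_eq, key]


-- the step function of A's leading column scan (definitionally pvLeadScan's folding function)
def pvLeadStep (st : Bool × List (List Int)) (c : List Int) : Bool × List (List Int) :=
  if st.1 then st
  else if pvCount255 c = (c.length : Int) then (false, st.2 ++ [c]) else (true, st.2)

theorem pv_leadStep_go (L : List (List Int)) :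
    ∀ acc, ((L.foldl pvLeadStep (false, acc)).2 = acc ++ L.takeWhile pvWhiteB) ∧
      ((L.foldl pvLeadStep (true, acc)).2 = acc) := by
  induction L with
  | nil => intro acc; simp
  | cons c t ih =>
    intro acc
    constructor
    · simp only [List.foldl_cons]
      by_cases hc : pvCount255 c = (c.length : Int)
      · have hstep : pvLeadStep (false, acc) c = (false, acc ++ [c]) := by
          simp [pvLeadStep, hc]
        have hw : pvWhiteB c = true := decide_eq_true hc
        rw [hstep, List.takeWhile_cons, hw]
        simp only [if_true]
        rw [(ih (acc ++ [c])).1, List.append_assoc]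
        rfl
      · have hstep : pvLeadStep (false, acc) c = (true, acc) := by
          simp [pvLeadStep, hc]
        have hw : pvWhiteB c = false := decide_eq_false hc
        rw [hstep, List.takeWhile_cons, hw]
        simp only [Bool.false_eq_true, if_false]
        rw [(ih acc).2, List.append_nil]
    · simp only [List.foldl_cons]
      have hstep : pvLeadStep (true, acc) c = (true, acc) := by simp [pvLeadStep]
      rw [hstep]
      exact (ih acc).2

theorem pv_leadScan_eq (L : List (List Int)) :
    pvLeadScan L = L.takeWhile pvWhiteB := by
  have hrw : pvLeadScan L = (L.foldl pvLeadStep (false, [])).2 := rfl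
  rw [hrw, (pv_leadStep_go L []).1, List.nil_append]


theorem pv_tw_len_le {α : Type} (p : α → Bool) (l : List α) :
    (l.takeWhile p).length ≤ l.length := by
  induction l with
  | nil => simp
  | cons a t ih =>
    by_cases h : p a = true <;> simp [List.takeWhile_cons, h] <;> omega


theorem pv_tw_sat {α : Type} (p : α → Bool) (d : α) (l : List α) (i : Nat)
    (h : i < (l.takeWhile p).length) : p (l.getD i d) = true := by
  induction l generalizing i with
  | nil => simp at h
  | cons a t ih =>
    by_cases hp : p a = true
    · cases i with
      | zero => simpa [List.getD] using hp
      | succ n =>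
        simp only [List.takeWhile_cons, hp, if_true, List.length_cons] at h
        simpa [List.getD] using ih n (by omega)
    · simp [List.takeWhile_cons, hp] at h


theorem pv_tw_stop {α : Type} (p : α → Bool) (d : α) (l : List α)
    (h : (l.takeWhile p).length < l.length) : p (l.getD ((l.takeWhile p).length) d) = false := by
  induction l with
  | nil => simp at h
  | cons a t ih =>
    by_cases hp : p a = true
    · simp only [List.takeWhile_cons, hp, if_true, List.length_cons] at h ⊢
      simpa [List.getD] using ih (by omega)
    · simp only [List.takeWhile_cons, hp]
      simpa [List.getD] using Bool.eq_false_iff.mpr hp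


theorem pv_cdw_zero (q : List (List Int)) :
    pvCdw q 0 = if pvWhiteB (q.getD 0 []) then 1 else 0 := rfl

theorem pv_cdw_succ (q : List (List Int)) (n : Nat) :
    pvCdw q (n + 1) = if pvWhiteB (q.getD (n + 1) []) then pvCdw q n + 1 else 0 := rfl

theorem pv_trail_succ (q : List (List Int)) (fuel : Nat) (s : Int) (acc : List (List Int)) :
    pvTrailScan q (fuel + 1) s acc =
      if s ≤ (q.length : Int) ∧ 0 ≤ s then
        if pvCount255 (q.getD s.toNat []) = ((q.getD s.toNat []).length : Int) then
          pvTrailScan q fuel (s - 1) (acc ++ [q.getD s.toNat []])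
        else acc
      else acc := rfl

theorem pv_trailScan_len (q : List (List Int)) :
    ∀ (s : Nat), s < q.length → ∀ (fuel : Nat) (acc : List (List Int)), s + 2 ≤ fuel →
    (pvTrailScan q fuel (s : Int) acc).length = acc.length + pvCdw q s := by
  intro s
  induction s with
  | zero =>
    intro hlt fuel acc hf
    obtain ⟨f, rfl⟩ : ∃ f, fuel = f + 1 := ⟨fuel - 1, by omega⟩
    rw [pv_trail_succ, if_pos (by constructor <;> omega)]
    have hs0 : ((0 : Nat) : Int).toNat = 0 := rfl
    rw [hs0, pv_cdw_zero]
    by_cases hw : pvWhiteB (q.getD 0 []) = true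
    · rw [if_pos (of_decide_eq_true hw), if_pos hw]
      obtain ⟨f', rfl⟩ : ∃ f', f = f' + 1 := ⟨f - 1, by omega⟩
      have hneg : (((0 : Nat) : Int) - 1) = -1 := by norm_num
      rw [hneg, pv_trail_succ, if_neg (by omega)]
      simp
    · rw [if_neg (of_decide_eq_false (Bool.eq_false_iff.mpr hw)), if_neg hw]
      omega
  | succ n ih =>
    intro hlt fuel acc hf
    obtain ⟨f, rfl⟩ : ∃ f, fuel = f + 1 := ⟨fuel - 1, by omega⟩
    rw [pv_trail_succ, if_pos (by constructor <;> omega)]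
    have hsn : (((n + 1 : Nat) : Int)).toNat = n + 1 := by omega
    rw [hsn, pv_cdw_succ]
    by_cases hw : pvWhiteB (q.getD (n + 1) []) = true
    · rw [if_pos (of_decide_eq_true hw), if_pos hw]
      have hcast : (((n + 1 : Nat) : Int)) - 1 = ((n : Nat) : Int) := by omega
      rw [hcast, ih (by omega) f (acc ++ [q.getD (n + 1) []]) (by omega)]
      simp
      omega
    · rw [if_neg (of_decide_eq_false (Bool.eq_false_iff.mpr hw)), if_neg hw]
      omega



theorem pv_cdw_sat (q : List (List Int)) (s : Nat) :
    ∀ i, i ≤ s → s + 1 ≤ i + pvCdw q s → pvWhiteB (q.getD i []) = true := by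
  induction s with
  | zero =>
    intro i h1 h2
    interval_cases i
    rw [pv_cdw_zero] at h2
    by_cases hw : pvWhiteB (q.getD 0 []) = true
    · exact hw
    · rw [if_neg hw] at h2
      omega
  | succ n ih =>
    intro i h1 h2
    by_cases hw : pvWhiteB (q.getD (n + 1) []) = true
    · rcases Nat.lt_or_ge i (n + 1) with hi | hi
      · have hc : pvCdw q (n + 1) = pvCdw q n + 1 := by rw [pv_cdw_succ, if_pos hw]
        exact ih i (by omega) (by omega)
      · have : i = n + 1 := by omega
        subst this; exact hw
    · have hc : pvCdw q (n + 1) = 0 := by rw [pv_cdw_succ, if_neg hw]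
      omega


theorem pv_cdw_stop (q : List (List Int)) (s : Nat) (h : pvCdw q s ≤ s) :
    pvWhiteB (q.getD (s - pvCdw q s) []) = false := by
  induction s with
  | zero =>
    by_cases hw : pvWhiteB (q.getD 0 []) = true
    · exfalso; rw [pv_cdw_zero, if_pos hw] at h; omega
    · simpa using hw
  | succ n ih =>
    by_cases hw : pvWhiteB (q.getD (n + 1) []) = true
    · have hc : pvCdw q (n + 1) = pvCdw q n + 1 := by rw [pv_cdw_succ, if_pos hw]
      rw [hc] at h ⊢
      have : n + 1 - (pvCdw q n + 1) = n - pvCdw q n := by omega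
      rw [this]
      exact ih (by omega)
    · have hc : pvCdw q (n + 1) = 0 := by rw [pv_cdw_succ, if_neg hw]
      rw [hc]
      simpa using hw


theorem pv_lo_spec (m : List (List Int)) (y : Nat) :
    ∀ (n lo : Nat), y - lo ≤ n → lo ≤ y →
      lo ≤ pvLo m y lo ∧ pvLo m y lo ≤ y ∧
      (∀ c, lo ≤ c → c < pvLo m y lo → pvColWhite m c = true) ∧
      (pvLo m y lo < y → pvColWhite m (pvLo m y lo) = false) := by
  intro n
  induction n with
  | zero =>
    intro lo hn hle
    have hc : ¬(lo < y ∧ pvColWhite m lo = true) := by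
      intro hcc
      omega
    rw [pvLo, dif_neg hc]
    exact ⟨le_refl _, hle, fun c h1 h2 => absurd h2 (by omega), fun h => absurd h (by omega)⟩
  | succ n ih =>
    intro lo hn hle
    by_cases hc : lo < y ∧ pvColWhite m lo = true
    · rw [pvLo, dif_pos hc]
      obtain ⟨h1, h2, h3, h4⟩ := ih (lo + 1) (by omega) (by omega)
      refine ⟨by omega, h2, ?_, h4⟩
      intro c hc1 hc2
      rcases Nat.eq_or_lt_of_le hc1 with rfl | hlt
      · exact hc.2
      · exact h3 c (by omega) hc2
    · rw [pvLo, dif_neg hc]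
      refine ⟨le_refl _, hle, fun c h1 h2 => absurd h2 (by omega), ?_⟩
      intro hlt
      by_cases hw : pvColWhite m lo = true
      · exact absurd ⟨hlt, hw⟩ hc
      · simpa using hw


theorem pv_hi_spec (m : List (List Int)) (lo : Nat) :
    ∀ (n hi : Nat), hi ≤ n → lo ≤ hi →
      lo ≤ pvHi m lo hi ∧ pvHi m lo hi ≤ hi ∧
      (∀ c, pvHi m lo hi ≤ c → c < hi → pvColWhite m c = true) ∧
      (lo < pvHi m lo hi → pvColWhite m (pvHi m lo hi - 1) = false) := by
  intro n
  induction n with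
  | zero =>
    intro hi hn hle
    have hc : ¬(lo < hi ∧ pvColWhite m (hi - 1) = true) := by
      intro hcc
      omega
    rw [pvHi, dif_neg hc]
    exact ⟨hle, le_refl _, fun c h1 h2 => absurd h2 (by omega), fun h => absurd h (by omega)⟩
  | succ n ih =>
    intro hi hn hle
    by_cases hc : lo < hi ∧ pvColWhite m (hi - 1) = true
    · rw [pvHi, dif_pos hc]
      obtain ⟨h1, h2, h3, h4⟩ := ih (hi - 1) (by omega) (by omega)
      refine ⟨h1, by omega, ?_, h4⟩
      intro c hc1 hc2
      rcases Nat.lt_or_ge c (hi - 1) with h | h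
      · exact h3 c hc1 h
      · have hce : c = hi - 1 := by omega
        subst hce
        exact hc.2
    · rw [pvHi, dif_neg hc]
      refine ⟨hle, le_refl _, fun c h1 h2 => absurd h2 (by omega), ?_⟩
      intro hlt
      by_cases hw : pvColWhite m (hi - 1) = true
      · exact absurd ⟨hlt, hw⟩ hc
      · simpa using hw


theorem pv_cut_unique (W : Nat → Bool) (y k1 k2 : Nat)
    (h1 : k1 ≤ y) (h2 : k2 ≤ y)
    (a1 : ∀ c, c < k1 → W c = true) (b1 : k1 < y → W k1 = false)
    (a2 : ∀ c, c < k2 → W c = true) (b2 : k2 < y → W k2 = false) : k1 = k2 := by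
  rcases Nat.lt_trichotomy k1 k2 with h | h | h
  · have t1 := a2 k1 h
    have t2 := b1 (by omega)
    simp [t1] at t2
  · exact h
  · have t1 := a1 k2 h
    have t2 := b2 (by omega)
    simp [t1] at t2


theorem pv_cut_unique' (W : Nat → Bool) (lo y h1v h2v : Nat)
    (l1 : lo ≤ h1v) (u1 : h1v ≤ y) (a1 : ∀ c, h1v ≤ c → c < y → W c = true)
    (b1 : lo < h1v → W (h1v - 1) = false)
    (l2 : lo ≤ h2v) (u2 : h2v ≤ y) (a2 : ∀ c, h2v ≤ c → c < y → W c = true)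
    (b2 : lo < h2v → W (h2v - 1) = false) : h1v = h2v := by
  rcases Nat.lt_trichotomy h1v h2v with h | h | h
  · have t1 := a1 (h2v - 1) (by omega) (by omega)
    have t2 := b2 (by omega)
    simp [t1] at t2
  · exact h
  · have t1 := a2 (h1v - 1) (by omega) (by omega)
    have t2 := b1 (by omega)
    simp [t1] at t2


-- ===== VERDICT (by name: the statement is the Claim_ definition above) =====
theorem htrim_spec : Claim_equal_htrim := by
  intro img _ hpre
  unfold Spec_htrim
  obtain ⟨st, m⟩ := img
  by_cases hm : m = []
  · subst hm
    simp [htrim, htrim_alt]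
  · rcases hpre with h | ⟨hrows0, c0, hc00, row0, hrow00, hnw0⟩
    · exact absurd h hm
    · have hrows : ∀ row ∈ m, (m.headD []).length ≤ row.length := hrows0
      have hc0 : c0 < (m.headD []).length := hc00
      have hrow0 : row0 ∈ m := hrow00
      have hnw : row0.getD c0 0 ≠ 255 := hnw0
      clear hrows0 hc00 hrow00 hnw0
      unfold htrim htrim_alt
      dsimp only
      rw [if_pos hm, if_neg hm]
      rw [pv_transpose_cols m, pv_leadScan_eq]
      set y := (m.headD []).length with hy
      set mat := (List.range y).map (pvColF m) with hmatdef
      have hmatlen : mat.length = y := by simp [hmatdef]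
      set k := (mat.takeWhile pvWhiteB).length with hk
      set q := mat.drop k with hqdef
      set o := q.length with ho
      set p := (pvTrailScan q (o + 1) ((o : Int) - 1) []).length with hp
      set z := q.take (o - p) with hzdef
      -- basic facts
      have hW0 : pvColWhite m c0 = false := by
        rcases hb : pvColWhite m c0 with _ | _
        · rfl
        · exfalso
          unfold pvColWhite at hb
          rw [List.all_eq_true] at hb
          exact hnw (by simpa using hb row0 hrow0)
      have hkley : k ≤ y := hmatlen ▸ pv_tw_len_le pvWhiteB mat
      have hmatget : ∀ c, c < y → mat.getD c [] = pvColF m c := by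
        intro c hc
        rw [List.getD_eq_getElem _ _ (by omega)]
        simp [hmatdef]
      have hksat : ∀ c, c < k → pvColWhite m c = true := by
        intro c hc
        have h1 := pv_tw_sat pvWhiteB [] mat c (hk ▸ hc)
        rwa [hmatget c (by omega), pv_whiteB_colF] at h1
      have hkstop : k < y → pvColWhite m k = false := by
        intro hlt
        have h1 := pv_tw_stop pvWhiteB [] mat (by omega)
        rw [← hk] at h1
        rwa [hmatget k (by omega), pv_whiteB_colF] at h1
      have hky : k < y := by
        by_contra hcon
        have hck : c0 < k := by omega
        have hh := hksat c0 hck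
        rw [hW0] at hh
        exact absurd hh (by simp)
      have hoy : o = y - k := by simp [ho, hqdef, hmatlen]
      have hqget : ∀ i, i < o → q.getD i [] = pvColF m (k + i) := by
        intro i hi
        rw [hqdef, List.getD_eq_getElem _ _ (by simp [hmatlen]; omega)]
        simp [hmatdef, List.getElem_drop]
      have hqw : ∀ i, i < o → pvWhiteB (q.getD i []) = pvColWhite m (k + i) := by
        intro i hi
        rw [hqget i hi, pv_whiteB_colF]
      have hpcdw : p = pvCdw q (o - 1) := by
        have hlen := pv_trailScan_len q (o - 1) (by omega) (o + 1) [] (by omega)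
        rw [show (((o - 1 : Nat)) : Int) = (o : Int) - 1 by omega] at hlen
        simpa [hp] using hlen
      have hq0 : pvWhiteB (q.getD 0 []) = false := by
        rw [hqw 0 (by omega)]
        simpa using hkstop hky
      have hpo : p < o := by
        by_contra hcon
        have hsat := pv_cdw_sat q (o - 1) 0 (by omega) (by rw [← hpcdw]; omega)
        rw [hq0] at hsat
        exact absurd hsat (by simp)
      have htrail : ∀ c, k + (o - p) ≤ c → c < y → pvColWhite m c = true := by
        intro c h1 h2
        have hi1 : c - k < o := by omega
        have hsat := pv_cdw_sat q (o - 1) (c - k) (by omega) (by rw [← hpcdw]; omega)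
        rw [hqw (c - k) hi1] at hsat
        rwa [show k + (c - k) = c by omega] at hsat
      have hstop : pvColWhite m (k + (o - p) - 1) = false := by
        have hs := pv_cdw_stop q (o - 1) (by rw [← hpcdw]; omega)
        rw [← hpcdw] at hs
        rw [hqw (o - 1 - p) (by omega)] at hs
        rwa [show k + (o - 1 - p) = k + (o - p) - 1 by omega] at hs
      have hlo : pvLo m y 0 = k := by
        obtain ⟨_, hl2, hl3, hl4⟩ := pv_lo_spec m y y 0 (by omega) (by omega)
        exact pv_cut_unique (pvColWhite m) y _ k hl2 hkley
          (fun c hc => hl3 c (by omega) hc) hl4 hksat hkstop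
      have hhi : pvHi m k y = k + (o - p) := by
        obtain ⟨hh1, hh2, hh3, hh4⟩ := pv_hi_spec m k y y (by omega) (by omega)
        exact pv_cut_unique' (pvColWhite m) k y _ (k + (o - p)) hh1 hh2 hh3 hh4
          (by omega) (by omega) htrail (fun _ => hstop)
      have hzlen : z.length = o - p := by
        rw [hzdef]
        simp
        omega
      have hzget : ∀ j, j < o - p → z.getD j [] = pvColF m (k + j) := by
        intro j hj
        rw [hzdef, List.getD_eq_getElem _ _ (by simp; omega)]
        rw [List.getElem_take]
        rw [← List.getD_eq_getElem q [] (by omega)]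
        exact hqget j (by omega)
      have hy1 : (z.headD []).length = m.length := by
        have h0 : z.headD [] = z.getD 0 [] := by
          rcases z with _ | ⟨a, t⟩
          · simp at hzlen
            omega
          · simp [List.headD, List.getD]
        rw [h0, hzget 0 (by omega)]
        simp [pvColF]
      rw [pv_transpose_cols z, hy1, hlo, hhi]
      refine congrArg (fun l => some ("1", l)) ?_
      apply List.ext_getElem
      · simp
      · intro i h1 h2
        have h2' : i < m.length := by simpa using h2
        simp only [List.getElem_map, List.getElem_range]
        have hri : y ≤ (m[i]'h2').length := hrows _ (List.getElem_mem h2')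
        rw [PySem.List.slice_natCast, Nat.add_sub_cancel_left]
        unfold pvColF
        apply List.ext_getElem
        · simp [hzlen]
          omega
        · intro j hj1 hj2
          have hj : j < o - p := by simpa [hzlen] using hj1
          simp only [List.getElem_map, List.getElem_range]
          rw [hzget j hj]
          unfold pvColF
          rw [List.getD_eq_getElem _ _ (by simpa using h2')]
          simp only [List.getElem_map, List.getElem_range]
          rw [List.getD_eq_getElem m [] h2']
          rw [List.getD_eq_getElem _ 0 (by omega)]
          simp only [List.getElem_take, List.getElem_drop]
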